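-- pv_equiv track=rewrite | github.com/razoraze123/projet3 | scraper/images_csv.py | best_from_srcset
-- ===== SOURCE A (Python) =====
-- from typing import Dict, Iterable, List, Set, Tuple, Callable
--
-- def best_from_srcset(srcset_value: str) -> str | None:
--     try:
--         parts = [p.strip() for p in srcset_value.split(",")]
--         pairs: List[Tuple[str, int]] = []
--         for p in parts:
--             tokens = p.split()
--             if not tokens: continue
--             url = tokens[0]; size = 0
--             if len(tokens) >= 2 and tokens[1].endswith("w"):
--                 try: size = int(tokens[1][:-1])
--                 except Exception: size = 0
--             pairs.append((url, size))
--         if not pairs: return None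
--         pairs.sort(key=lambda x: x[1])
--         return pairs[-1][0]
--     except Exception:
--         return None
-- ===== SOURCE B (Python) =====
-- def best_from_srcset(srcset_value: str) -> str | None:
--     best = None  # (url, size) of the best entry seen so far
--     for p in srcset_value.split(","):
--         tokens = p.strip().split()
--         if not tokens:
--             continue
--         url = tokens[0]
--         size = 0
--         if len(tokens) >= 2 and tokens[1].endswith("w"):
--             try:
--                 size = int(tokens[1][:-1])
--             except Exception:
--                 size = 0
--         if best is None or best[1] <= size:
--             best = (url, size)
--     return None if best is None else best[0]
-- ===== Notes on version B (the rewrite author's own statement) =====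
-- stated objective: simpler
-- what changed: Instead of collecting all (url,size) pairs, stably sorting them by size and taking the last, B keeps a single running best pair updated with >= so the last maximal entry wins, dropping the list, the sort and the outer try/except.
import Mathlib
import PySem

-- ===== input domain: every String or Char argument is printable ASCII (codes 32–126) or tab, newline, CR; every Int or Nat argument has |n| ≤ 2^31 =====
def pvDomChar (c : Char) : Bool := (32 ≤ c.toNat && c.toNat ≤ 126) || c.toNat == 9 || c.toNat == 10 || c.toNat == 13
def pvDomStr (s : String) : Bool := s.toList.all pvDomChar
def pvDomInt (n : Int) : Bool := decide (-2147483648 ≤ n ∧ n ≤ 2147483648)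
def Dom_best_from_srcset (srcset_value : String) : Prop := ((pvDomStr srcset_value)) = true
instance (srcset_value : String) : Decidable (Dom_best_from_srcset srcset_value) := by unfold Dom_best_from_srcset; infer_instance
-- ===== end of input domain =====

-- B replaces the collect-all-pairs + stable-sort-by-size + take-last of A by a single
-- running best (url,size), updated with >= so the last maximal entry wins (simpler, O(n)).

-- shared per-entry parsing (identical lines in both Pythons): tokens = p.split();
-- skip if empty; url = tokens[0]; size = int(tokens[1][:-1]) if tokens[1] ends in "w" else 0
def pvParse (p : String) : Option (String × Int) :=
  match PySem.Str.split₀ p with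
  | [] => none
  | url :: rest =>
    let size : Int :=
      match rest with
      | [] => 0
      | t :: _ =>
        if PySem.Str.endswith t "w" then
          (PySem.Int.ofStr? (PySem.Str.slice t none (some (-1)))).getD 0
        else 0
    some (url, size)

-- ===== PORT A =====
-- sep "," is nonempty so split? is always `some`; getD [] is that fact, not a default.
def best_from_srcset (srcset_value : String) : Option String :=
  let parts := ((PySem.Str.split? srcset_value ",").getD []).map PySem.Str.strip
  let pairs := parts.foldl (fun acc p =>
      match pvParse p with
      | none => acc
      | some pr => acc ++ [pr]) ([] : List (String × Int))
  if pairs.isEmpty then none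
  else ((PySem.List.sorted pairs (fun x => x.2)).getLast?).map Prod.fst

-- ===== PORT B =====
def best_from_srcset_alt (srcset_value : String) : Option String :=
  let best := ((PySem.Str.split? srcset_value ",").getD []).foldl (fun best p =>
      match pvParse (PySem.Str.strip p) with
      | none => best
      | some pr =>
        match best with
        | none => some pr
        | some b => if b.2 ≤ pr.2 then some pr else some b) none
  best.map Prod.fst

-- ===== PRECONDITION & SPEC =====
def Spec_best_from_srcset (srcset_value : String) (out : Option String) : Prop := out = best_from_srcset_alt srcset_value
instance (srcset_value : String) (out : Option String) : Decidable (Spec_best_from_srcset srcset_value out) := by unfold Spec_best_from_srcset; infer_instance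

-- ===== CLAIM (what is proved, stated in full; the proofs are below) =====
def Claim_equal_best_from_srcset : Prop := ∀ (srcset_value : String), Dom_best_from_srcset srcset_value → Spec_best_from_srcset srcset_value (best_from_srcset srcset_value)

-- ===== LEMMAS AND PROOFS =====

-- B's per-pair update step
def pvUpd (best : Option (String × Int)) (pr : String × Int) : Option (String × Int) :=
  match best with
  | none => some pr
  | some b => if b.2 ≤ pr.2 then some pr else some b

def pvBefore (a b : String × Int) : Bool := decide (a.2 < b.2)

lemma pairs_eq (parts : List String) (acc : List (String × Int)) :
    parts.foldl (fun acc p =>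
      match pvParse p with
      | none => acc
      | some pr => acc ++ [pr]) acc = acc ++ parts.filterMap pvParse := by
  induction parts generalizing acc with
  | nil => simp
  | cons p ps ih =>
    simp only [List.foldl_cons, List.filterMap_cons]
    cases h : pvParse p <;> simp only [ih] ; simp

lemma bfold_eq (parts : List String) (b : Option (String × Int)) :
    parts.foldl (fun best p =>
      match pvParse (PySem.Str.strip p) with
      | none => best
      | some pr => pvUpd best pr) b
      = ((parts.map PySem.Str.strip).filterMap pvParse).foldl pvUpd b := by
  induction parts generalizing b with
  | nil => rfl
  | cons p ps ih =>
    simp only [List.foldl_cons, List.map_cons, List.filterMap_cons]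
    cases h : pvParse (PySem.Str.strip p) <;> simp only [ih] ; rfl

lemma insertBy_ne_nil (x : String × Int) (ys : List (String × Int)) :
    PySem.List.insertBy pvBefore x ys ≠ [] := by
  intro h
  have := (PySem.List.mem_insertBy pvBefore x x ys).mpr (Or.inl rfl)
  rw [h] at this
  exact absurd this (List.not_mem_nil)

lemma insertBy_pairwise (x : String × Int) (ys : List (String × Int))
    (h : ys.Pairwise (fun a b => a.2 ≤ b.2)) :
    (PySem.List.insertBy pvBefore x ys).Pairwise (fun a b => a.2 ≤ b.2) := by
  induction ys with
  | nil => simp [PySem.List.insertBy]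
  | cons y ys ih =>
    rw [List.pairwise_cons] at h
    obtain ⟨hy, hys⟩ := h
    by_cases hb : pvBefore x y = true
    · have hxy : x.2 < y.2 := by simpa [pvBefore] using hb
      have hstep : PySem.List.insertBy pvBefore x (y :: ys) = x :: y :: ys := by
        simp [PySem.List.insertBy, hb]
      rw [hstep]
      refine List.Pairwise.cons ?_ (List.Pairwise.cons hy hys)
      intro z hz
      rcases List.mem_cons.mp hz with rfl | hz
      · exact le_of_lt hxy
      · exact le_trans (le_of_lt hxy) (hy z hz)
    · have hstep : PySem.List.insertBy pvBefore x (y :: ys)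
          = y :: PySem.List.insertBy pvBefore x ys := by
        simp [PySem.List.insertBy, hb]
      rw [hstep]
      refine List.Pairwise.cons ?_ (ih hys)
      intro z hz
      rcases (PySem.List.mem_insertBy pvBefore x z ys).mp hz with hzx | hzy
      · subst hzx
        simpa [pvBefore] using hb
      · exact hy z hzy

lemma getLast?_insertBy (x : String × Int) (ys : List (String × Int))
    (h : ys.Pairwise (fun a b => a.2 ≤ b.2)) :
    (PySem.List.insertBy pvBefore x ys).getLast? = pvUpd ys.getLast? x := by
  induction ys with
  | nil => simp [PySem.List.insertBy, pvUpd]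
  | cons y ys ih =>
    rw [List.pairwise_cons] at h
    obtain ⟨hy, hys⟩ := h
    by_cases hb : pvBefore x y = true
    · have hxy : x.2 < y.2 := by simpa [pvBefore] using hb
      have hstep : PySem.List.insertBy pvBefore x (y :: ys) = x :: y :: ys := by
        simp [PySem.List.insertBy, hb]
      rw [hstep, List.getLast?_cons_cons]
      -- the last element m of y :: ys has y.2 ≤ m.2, so x does not displace it
      cases hm : (y :: ys).getLast? with
      | none => simp [List.getLast?_eq_none_iff] at hm
      | some m =>
        have hmem : m ∈ y :: ys := List.mem_of_getLast? hm
        have hym : y.2 ≤ m.2 := by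
          rcases List.mem_cons.mp hmem with rfl | hmem
          · exact le_refl _
          · exact hy m hmem
        simp only [pvUpd]
        rw [if_neg (by omega)]
    · have hyx : y.2 ≤ x.2 := by simpa [pvBefore] using hb
      have hstep : PySem.List.insertBy pvBefore x (y :: ys)
          = y :: PySem.List.insertBy pvBefore x ys := by
        simp [PySem.List.insertBy, hb]
      rw [hstep]
      cases ys with
      | nil =>
        simp [PySem.List.insertBy, pvUpd, List.getLast?_cons_cons, hyx]
      | cons z zs =>
        have h1 : (y :: PySem.List.insertBy pvBefore x (z :: zs)).getLast?
            = (PySem.List.insertBy pvBefore x (z :: zs)).getLast? := by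
          cases hcase : PySem.List.insertBy pvBefore x (z :: zs) with
          | nil => exact absurd hcase (insertBy_ne_nil _ _)
          | cons w ws => exact List.getLast?_cons_cons
        rw [h1, ih hys, List.getLast?_cons_cons]

lemma foldl_insertBy_getLast (l : List (String × Int)) (acc : List (String × Int))
    (h : acc.Pairwise (fun a b => a.2 ≤ b.2)) :
    (l.foldl (fun acc x => PySem.List.insertBy pvBefore x acc) acc).getLast?
      = l.foldl pvUpd acc.getLast? := by
  induction l generalizing acc with
  | nil => rfl
  | cons x xs ih =>
    simp only [List.foldl_cons]
    rw [ih _ (insertBy_pairwise x acc h), getLast?_insertBy x acc h]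

lemma sorted_getLast_eq_fold (l : List (String × Int)) :
    (PySem.List.sorted l (fun x => x.2)).getLast? = l.foldl pvUpd none := by
  rw [PySem.List.sorted_eq_foldl_insertBy]
  exact foldl_insertBy_getLast l [] (List.Pairwise.nil)

-- ===== VERDICT (by name: the statement is the Claim_ definition above) =====
theorem best_from_srcset_spec : Claim_equal_best_from_srcset := by
  intro s _
  unfold Spec_best_from_srcset best_from_srcset best_from_srcset_alt
  simp only [pairs_eq, List.nil_append]
  have hb := bfold_eq ((PySem.Str.split? s ",").getD []) none
  simp only [pvUpd] at hb
  rw [hb]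
  set l := (((PySem.Str.split? s ",").getD []).map PySem.Str.strip).filterMap pvParse with hl
  by_cases hnil : l = []
  · simp [hnil]
  · rw [if_neg (by simpa using hnil), sorted_getLast_eq_fold]
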